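-- pv_equiv track=rewrite | github.com/PiyushKumarIITM/RailRoute | Train_project/trains/my_get_min_switch_route.py | get_min_switch_route
-- ===== SOURCE A (Python) =====
-- import itertools
--
-- def modify_combinations(combos):
--     modified_combos = []
--     for combo in combos:
--         # Start with the first pair, converting it to a list for modification
--         modified_list = [list(combo[0])]
--         for i in range(1, len(combo)):
--             if combo[i][0] == modified_list[-1][0]:
--                 # Update the last element of the last pair in modified_list
--                 modified_list[-1][3] = combo[i][3]
--             else:
--                 # Convert the current tuple to a list before appending
--                 modified_list.append(list(combo[i]))
--         # Convert modified lists back to tuples before appending to modified_combos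
--         modified_combos.append([tuple(item) for item in modified_list])
--     return modified_combos
--
-- def get_min_switch_route(list_of_lists):
--     # Generate all combinations
--     merged_list_of_trains_for_all_paths = []
--     for list_of_trains_for_path1 in list_of_lists:
--         combinations = list(itertools.product(*list_of_trains_for_path1))
--
--         # Convert tuples to lists of tuples
--         combinations = [list(item) for item in combinations]
--
--         # Modify the combinations
--         modified_combinations = modify_combinations(combinations)
--
--         merged_list_of_trains_for_all_paths += (modified_combinations)
--
--     # Determine the minimum size of the modified lists
--     if(len(merged_list_of_trains_for_all_paths)==0):
--         return [[]]
--     min_size = min(len(combo) for combo in merged_list_of_trains_for_all_paths)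
--     # Filter out lists with the minimum size
--     min_size_combinations = [combo for combo in merged_list_of_trains_for_all_paths if len(combo) == min_size]
--
--
--     return min_size_combinations
-- ===== SOURCE B (Python) =====
-- def _merge_ext(merged, t):
--     last = merged[-1]
--     if t[0] == last[0]:
--         return merged[:-1] + [(last[0], last[1], last[2], t[3])]
--     return merged + [tuple(t)]
--
--
-- def _routes(rest, merged):
--     # yield every fully merged route obtained by extending `merged`
--     # with one train from each remaining segment, in product order
--     if not rest:
--         yield merged
--         return
--     for t in rest[0]:
--         yield from _routes(rest[1:], _merge_ext(merged, t))
--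
--
-- def get_min_switch_route(list_of_lists):
--     best = None
--     result = []
--     for path in list_of_lists:
--         for t0 in path[0]:
--             for r in _routes(path[1:], [tuple(t0)]):
--                 n = len(r)
--                 if best is None or n < best:
--                     best, result = n, [r]
--                 elif n == best:
--                     result.append(r)
--     return result if best is not None else [[]]
-- ===== Notes on version B (the rewrite author's own statement) =====
-- stated objective: alternative
-- what changed: B fuses the product enumeration with the merge step in one recursive DFS and keeps a running minimum, instead of A's materialise-all-combinations, second merge pass, then min-scan plus filter-scan.
import Mathlib
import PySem

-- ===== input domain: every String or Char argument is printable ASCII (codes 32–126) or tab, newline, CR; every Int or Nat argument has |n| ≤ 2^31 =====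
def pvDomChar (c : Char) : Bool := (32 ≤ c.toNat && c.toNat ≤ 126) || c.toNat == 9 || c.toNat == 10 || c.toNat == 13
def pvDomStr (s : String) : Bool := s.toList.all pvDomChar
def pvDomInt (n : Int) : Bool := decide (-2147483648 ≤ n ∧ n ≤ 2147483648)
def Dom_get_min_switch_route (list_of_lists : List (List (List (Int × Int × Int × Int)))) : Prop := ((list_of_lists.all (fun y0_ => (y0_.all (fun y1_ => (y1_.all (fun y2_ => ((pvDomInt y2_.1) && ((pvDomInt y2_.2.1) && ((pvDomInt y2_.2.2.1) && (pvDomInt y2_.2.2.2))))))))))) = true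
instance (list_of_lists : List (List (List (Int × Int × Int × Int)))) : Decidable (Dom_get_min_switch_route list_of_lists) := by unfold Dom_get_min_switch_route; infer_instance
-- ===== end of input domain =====

-- B fuses product enumeration, merging and a running minimum into one recursive pass
-- (alternative decomposition; A materialises the product, merges in a second pass, then min-scans and filter-scans).


-- ===== PORT A =====
-- itertools.product(*ls), first iterable varies slowest
def pyProduct (ls : List (List (Int × Int × Int × Int))) : List (List (Int × Int × Int × Int)) :=
  match ls with
  | [] => [[]]
  | l :: rest => l.flatMap (fun x => (pyProduct rest).map (fun c => x :: c))

-- inner-loop body of modify_combinations: compare with modified_list[-1], overwrite its index 3 or append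
def mergeStepA (m : List (Int × Int × Int × Int)) (t : Int × Int × Int × Int) : List (Int × Int × Int × Int) :=
  match m.getLast? with
  | none => m ++ [t]          -- unreachable: m starts nonempty
  | some l =>
    if t.1 = l.1 then m.dropLast ++ [(l.1, l.2.1, l.2.2.1, t.2.2.2)]
    else m ++ [t]

-- one combo of modify_combinations: modified_list = [combo[0]] then the for-loop over combo[1:]
-- (combo[0] on an empty combo raises IndexError in Python; Pre_ keeps that unreachable)
def modifyOne (combo : List (Int × Int × Int × Int)) : List (Int × Int × Int × Int) :=
  match combo with
  | [] => []
  | c0 :: rest => rest.foldl mergeStepA [c0]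

def modifyCombinations (combos : List (List (Int × Int × Int × Int))) : List (List (Int × Int × Int × Int)) :=
  combos.map modifyOne

def get_min_switch_route (list_of_lists : List (List (List (Int × Int × Int × Int)))) : List (List (Int × Int × Int × Int)) :=
  let merged := list_of_lists.foldl (fun acc path => acc ++ modifyCombinations (pyProduct path)) []
  match merged with
  | [] => [[]]
  | m :: ms =>
    let min_size := ms.foldl (fun a c => Nat.min a c.length) m.length
    (m :: ms).filter (fun c => c.length = min_size)

-- ===== PORT B =====
-- _merge_ext: last = merged[-1]; overwrite its 4th field or append
def mergeExtB (merged : List (Int × Int × Int × Int)) (t : Int × Int × Int × Int) : List (Int × Int × Int × Int) :=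
  match merged.getLast? with
  | none => merged ++ [t]     -- unreachable: merged starts as [t0]
  | some last =>
    if t.1 = last.1 then merged.dropLast ++ [(last.1, last.2.1, last.2.2.1, t.2.2.2)]
    else merged ++ [t]

-- _routes: DFS over the remaining segments, merging as we go
def routesGo (rest : List (List (Int × Int × Int × Int))) (merged : List (Int × Int × Int × Int)) : List (List (Int × Int × Int × Int)) :=
  match rest with
  | [] => [merged]
  | l :: ls => l.flatMap (fun t => routesGo ls (mergeExtB merged t))

-- running-minimum step of B's main loop
def stepB (st : Option Nat × List (List (Int × Int × Int × Int))) (r : List (Int × Int × Int × Int)) : Option Nat × List (List (Int × Int × Int × Int)) :=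
  match st with
  | (none, _) => (some r.length, [r])
  | (some b, res) =>
    if r.length < b then (some r.length, [r])
    else if r.length = b then (some b, res ++ [r])
    else (some b, res)

def get_min_switch_route_alt (list_of_lists : List (List (List (Int × Int × Int × Int)))) : List (List (Int × Int × Int × Int)) :=
  let fin := list_of_lists.foldl
    (fun st path =>
      match path with
      | [] => st                       -- unreachable under Pre_: path[0] raises IndexError on an empty path
      | l0 :: ls => (l0.flatMap (fun t0 => routesGo ls [t0])).foldl stepB st)
    (none, [])
  match fin.1 with
  | none => [[]]
  | some _ => fin.2

-- ===== PRECONDITION & SPEC =====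
-- Pre_ excludes inputs containing an empty path (no segments): there A raises IndexError on combo[0].
def Pre_get_min_switch_route (list_of_lists : List (List (List (Int × Int × Int × Int)))) : Prop :=
  ∀ p ∈ list_of_lists, p ≠ []
instance (list_of_lists : List (List (List (Int × Int × Int × Int)))) : Decidable (Pre_get_min_switch_route list_of_lists) := by unfold Pre_get_min_switch_route; infer_instance

def pvWitness_get_min_switch_route : (List (List (List (Int × Int × Int × Int)))) :=
  [[[(1,2,3,4),(5,6,7,8)], [(1,0,0,9)]]]

def Spec_get_min_switch_route (list_of_lists : List (List (List (Int × Int × Int × Int)))) (out : List (List (Int × Int × Int × Int))) : Prop := out = get_min_switch_route_alt list_of_lists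
instance (list_of_lists : List (List (List (Int × Int × Int × Int)))) (out : List (List (Int × Int × Int × Int))) : Decidable (Spec_get_min_switch_route list_of_lists out) := by unfold Spec_get_min_switch_route; infer_instance

-- ===== CLAIM (what is proved, stated in full; the proofs are below) =====
def Claim_equal_get_min_switch_route : Prop := ∀ (list_of_lists : List (List (List (Int × Int × Int × Int)))), Dom_get_min_switch_route list_of_lists → Pre_get_min_switch_route list_of_lists → Spec_get_min_switch_route list_of_lists (get_min_switch_route list_of_lists)
-- ===== LEMMAS AND PROOFS =====

-- B's merge step is (definitionally) A's merge step
theorem mergeExtB_eq_mergeStepA : mergeExtB = mergeStepA := rfl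

-- B's DFS produces exactly A's "merge each product combo" list
theorem routesGo_eq (rest : List (List (Int × Int × Int × Int))) (m : List (Int × Int × Int × Int)) :
    routesGo rest m = (pyProduct rest).map (fun c => c.foldl mergeStepA m) := by
  induction rest generalizing m with
  | nil => simp [routesGo, pyProduct]
  | cons l ls ih =>
    simp [routesGo, pyProduct, ih, mergeExtB_eq_mergeStepA, List.map_flatMap, List.map_map,
      Function.comp_def, List.foldl_cons]

-- the running minimum never exceeds its seed
theorem foldl_min_le (L : List (List (Int × Int × Int × Int))) (b : Nat) :
    L.foldl (fun a c => Nat.min a c.length) b ≤ b := by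
  induction L generalizing b with
  | nil => simp
  | cons d L ih => exact le_trans (ih _) (Nat.min_le_left _ _)

-- characterisation of B's running-minimum scan from a live state
theorem stepB_scan (L : List (List (Int × Int × Int × Int))) :
    ∀ (b : Nat) (res : List (List (Int × Int × Int × Int))),
    L.foldl stepB (some b, res) =
      (some (L.foldl (fun a c => Nat.min a c.length) b),
       (if L.foldl (fun a c => Nat.min a c.length) b < b then [] else res)
         ++ L.filter (fun c => c.length = L.foldl (fun a c => Nat.min a c.length) b)) := by
  induction L with
  | nil => intro b res; simp
  | cons c L ih =>
    intro b res
    simp only [List.foldl_cons]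
    by_cases h1 : c.length < b
    · have hstep : stepB (some b, res) c = (some c.length, [c]) := by
        simp [stepB, h1]
      have hmin : Nat.min b c.length = c.length := Nat.min_eq_right (Nat.le_of_lt h1)
      simp only [hstep, ih, hmin]
      have hMc : L.foldl (fun a c => Nat.min a c.length) c.length ≤ c.length := foldl_min_le L _
      set M := L.foldl (fun a c => Nat.min a c.length) c.length with hM
      by_cases h2 : M < c.length
      · have hne : ¬ (c.length = M) := by omega
        have h3 : M < b := lt_trans h2 h1
        simp [h2, h3, hne]
      · have heq : c.length = M := by omega
        have h3 : M < b := heq ▸ h1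
        simp [h3, heq]
    · by_cases h2 : c.length = b
      · have hstep : stepB (some b, res) c = (some b, res ++ [c]) := by
          simp [stepB, h2]
        have hmin : Nat.min b c.length = b := Nat.min_eq_left (le_of_eq h2.symm)
        simp only [hstep, ih, hmin]
        have hMb : L.foldl (fun a c => Nat.min a c.length) b ≤ b := foldl_min_le L _
        set M := L.foldl (fun a c => Nat.min a c.length) b with hM
        by_cases h3 : M < b
        · have hne : ¬ (c.length = M) := by omega
          simp [h3, hne]
        · have heq : c.length = M := by omega
          simp [h3, heq]
      · have h3 : b < c.length := Nat.lt_of_le_of_ne (Nat.le_of_not_lt h1) (fun e => h2 e.symm)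
        have hstep : stepB (some b, res) c = (some b, res) := by
          simp [stepB, h1, h2]
        have hmin : Nat.min b c.length = b := Nat.min_eq_left (Nat.le_of_lt h3)
        simp only [hstep, ih, hmin]
        have hMb : L.foldl (fun a c => Nat.min a c.length) b ≤ b := foldl_min_le L _
        set M := L.foldl (fun a c => Nat.min a c.length) b with hM
        have hne : ¬ (c.length = M) := by omega
        simp [hne]

-- running-minimum scan from the empty state = A's min + filter
theorem stepB_full (L : List (List (Int × Int × Int × Int))) :
    (match (L.foldl stepB (none, [])).1 with
     | none => ([[]] : List (List (Int × Int × Int × Int)))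
     | some _ => (L.foldl stepB (none, [])).2) =
    (match L with
     | [] => [[]]
     | m :: ms =>
       let min_size := ms.foldl (fun a c => Nat.min a c.length) m.length
       (m :: ms).filter (fun c => c.length = min_size)) := by
  match L with
  | [] => simp
  | m :: ms =>
    have h0 : stepB (none, []) m = (some m.length, [m]) := rfl
    simp only [List.foldl_cons, h0, stepB_scan]
    have hle : ms.foldl (fun a c => Nat.min a c.length) m.length ≤ m.length := foldl_min_le ms _
    set M := ms.foldl (fun a c => Nat.min a c.length) m.length with hM
    by_cases h : M < m.length
    · have hne : ¬ (m.length = M) := by omega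
      simp [h, hne]
    · have heq : m.length = M := by omega
      simp [List.filter_cons, heq]

-- one path's contribution in B = A's "merge every product combo" list for that path
theorem perpath_cons (l0 : List (Int × Int × Int × Int)) (ls : List (List (Int × Int × Int × Int))) :
    l0.flatMap (fun t0 => routesGo ls [t0]) = modifyCombinations (pyProduct (l0 :: ls)) := by
  simp [modifyCombinations, pyProduct, routesGo_eq, List.map_flatMap, List.map_map,
    Function.comp_def, modifyOne]

-- B's whole fold = the running-minimum scan over A's concatenated merged-route list
theorem foldB_concat (lol : List (List (List (Int × Int × Int × Int))))
    (hpre : ∀ p ∈ lol, p ≠ []) :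
    ∀ st, lol.foldl
      (fun st path =>
        match path with
        | [] => st
        | l0 :: ls => (l0.flatMap (fun t0 => routesGo ls [t0])).foldl stepB st)
      st
    = (lol.flatMap (fun p => modifyCombinations (pyProduct p))).foldl stepB st := by
  induction lol with
  | nil => intro st; simp
  | cons p lol ih =>
    intro st
    have hp : p ≠ [] := hpre p List.mem_cons_self
    obtain ⟨l0, ls, rfl⟩ := List.exists_cons_of_ne_nil hp
    have hrest : ∀ q ∈ lol, q ≠ [] := fun q hq => hpre q (List.mem_cons_of_mem _ hq)
    simp only [List.foldl_cons, List.flatMap_cons, List.foldl_append]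
    show lol.foldl _ ((l0.flatMap (fun t0 => routesGo ls [t0])).foldl stepB st) = _
    rw [perpath_cons, ih hrest]

-- ===== VERDICT (by name: the statement is the Claim_ definition above) =====
theorem get_min_switch_route_spec : Claim_equal_get_min_switch_route := by
  intro lol _ hpre
  unfold Spec_get_min_switch_route get_min_switch_route get_min_switch_route_alt
  simp only [PySem.List.foldl_append_eq_flatMap, List.nil_append]
  rw [foldB_concat lol hpre]
  exact (stepB_full _).symm
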